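-- pv_equiv track=rewrite | github.com/mk-99/p4ne | Sem1.3/maxg.py | max_asc
-- ===== SOURCE A (Python) =====
-- def max_asc(a):
--     """
--     Returns maximal ascending subsequence of sequence (non-recursive)
--     :param a: sequence of ints as list
--     :return: maximal ascending subsequence of a as list
--     """
--     sub_seq = []
--     for i in range(0, len(a)):
--         sub_seq.append([])
--
--     for i in range(0, len(a)):
--         for j in range(i, len(a)):
--             if len(sub_seq[i]) == 0 or a[j] > sub_seq[i][-1]:
--                 sub_seq[i].append(a[j])
--
--     max_len = len(sub_seq[0])
--     max_i = 0
--
--     for i in range(0, len(a)):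
--         if len(sub_seq[i]) > max_len:
--             max_len = len(sub_seq[i])
--             max_i = i
--
--     return sub_seq[max_i]
-- ===== SOURCE B (Python) =====
-- def max_asc(a):
--     """
--     Returns maximal ascending subsequence of sequence (non-recursive)
--     :param a: sequence of ints as list
--     :return: maximal ascending subsequence of a as list
--     """
--     # O(n): the greedy chain from i is a[i] followed by the chain from the
--     # first later index whose value exceeds a[i]; compute those "next" links
--     # right-to-left by jumping along already-built links, take the first
--     # start index of maximal chain length, and rebuild only that one chain.
--     n = len(a)
--     nxt = [None] * n
--     length = [0] * n
--     for i in reversed(range(n)):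
--         j = i + 1 if i + 1 < n else None
--         while j is not None and a[j] <= a[i]:
--             j = nxt[j]
--         nxt[i] = j
--         length[i] = 1 + (length[j] if j is not None else 0)
--     best = 0
--     for i in range(1, n):
--         if length[i] > length[best]:
--             best = i
--     res = []
--     j = best
--     while j is not None:
--         res.append(a[j])
--         j = nxt[j]
--     return res
-- ===== Notes on version B (the rewrite author's own statement) =====
-- stated objective: faster
-- what changed: Replaces A's per-start quadratic greedy rebuild of every chain with a single right-to-left pass that links each index to the first later larger element (amortized-O(n) pointer jumping), a length recurrence over those links, and one reconstruction of the best chain.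
import Mathlib
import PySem

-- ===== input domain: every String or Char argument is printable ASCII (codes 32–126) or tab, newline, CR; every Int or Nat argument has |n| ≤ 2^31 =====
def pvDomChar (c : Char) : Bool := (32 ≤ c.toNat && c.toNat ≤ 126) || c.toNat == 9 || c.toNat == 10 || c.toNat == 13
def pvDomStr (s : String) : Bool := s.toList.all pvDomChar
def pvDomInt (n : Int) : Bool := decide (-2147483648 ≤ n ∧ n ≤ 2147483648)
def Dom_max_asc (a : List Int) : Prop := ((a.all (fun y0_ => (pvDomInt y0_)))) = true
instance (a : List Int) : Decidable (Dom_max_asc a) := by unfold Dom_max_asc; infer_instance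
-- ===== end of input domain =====

-- B replaces A's quadratic per-start greedy rebuild with one right-to-left next-greater-link
-- pass, a length recurrence, and a single reconstruction of the best chain (objective: faster).

-- ===== PORT A =====
-- the body of A's inner loop: append a[j] if sub_seq[i] is empty or a[j] > sub_seq[i][-1]
def aStep (acc : List Int) (v : Int) : List Int :=
  match acc.getLast? with
  | none => acc ++ [v]
  | some l => if l < v then acc ++ [v] else acc

-- sub_seq[i] as built by the inner loop over j in range(i, len(a))
def aRow (a : List Int) (i : Int) : List Int :=
  (PySem.List.pyRange i ((a.length : Int)) 1).foldl
    (fun acc j => aStep acc (PySem.List.pyGetD a j 0)) []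

-- the two initial loops of A
def aSubSeq (a : List Int) : List (List Int) :=
  (PySem.List.pyRange 0 ((a.length : Int)) 1).map (aRow a)

-- the third loop of A: track (max_len, max_i), updating on a strictly larger length
def aArg (L : Int → Int) (R : List Int) (st : Int × Int) : Int × Int :=
  R.foldl (fun st i => if st.1 < L i then (L i, i) else st) st

def max_asc (a : List Int) : List Int :=
  let subSeq := aSubSeq a
  -- max_len = len(sub_seq[0]) raises IndexError on a = []; Pre_ excludes that input
  let st := aArg (fun i => ((PySem.List.pyGetD subSeq i []).length : Int))
    (PySem.List.pyRange 0 ((a.length : Int)) 1)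
    (((PySem.List.pyGetD subSeq 0 []).length : Int), 0)
  PySem.List.pyGetD subSeq st.2 []

-- ===== PORT B =====
-- the inner while loop of Source B: jump along nxt links while a[j] <= x (fuel only bounds the
-- in-range recursion; Source B's indices strictly increase, so fuel = len(a) is never exhausted)
def bWalk (a : List Int) (nxt : List (Option Int)) (x : Int) : Option Int → Nat → Option Int
  | j?, 0 => j?
  | none, _ + 1 => none
  | some j, fuel + 1 =>
      if PySem.List.pyGetD a j 0 ≤ x then
        bWalk a nxt x (nxt.getD j.toNat none) fuel
      else some j

-- the final while loop of Source B: follow nxt links from the best start, collecting values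
def bCollect (a : List Int) (nxt : List (Option Int)) : Option Int → Nat → List Int → List Int
  | none, _, res => res
  | some _, 0, res => res
  | some j, fuel + 1, res =>
      bCollect a nxt (nxt.getD j.toNat none) fuel (res ++ [PySem.List.pyGetD a j 0])

-- the body of Source B's main (reversed) loop: set nxt[i] and length[i]
def bstep (a : List Int) (st : List (Option Int) × List Int) (i : Int) :
    List (Option Int) × List Int :=
  let j0 : Option Int := if i + 1 < ((a.length : Int)) then some (i + 1) else none
  let j := bWalk a st.1 (PySem.List.pyGetD a i 0) j0 a.length
  let li : Int := 1 + (match j with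
    | some jj => st.2.getD jj.toNat 0
    | none => 0)
  (st.1.set i.toNat j, st.2.set i.toNat li)

-- the second loop of Source B: keep the first index of maximal length
def bArg (L : Int → Int) (R : List Int) (b : Int) : Int :=
  R.foldl (fun best i => if L best < L i then i else best) b

def max_asc_alt (a : List Int) : List Int :=
  -- for i in reversed(range(n)): compute nxt[i] and length[i]
  let st := ((PySem.List.pyRange 0 ((a.length : Int)) 1).reverse).foldl (bstep a)
    (List.replicate a.length none, List.replicate a.length 0)
  let best := bArg (fun i => st.2.getD i.toNat 0) (PySem.List.pyRange 1 ((a.length : Int)) 1) 0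
  -- Source B raises IndexError (res.append(a[0])) on a = [], like A; Pre_ excludes that input
  bCollect a st.1 (some best) a.length []

-- ===== PRECONDITION & SPEC =====
-- A evaluates sub_seq[0] (and B a[best]) unconditionally, so both raise IndexError on []
def Pre_max_asc (a : List Int) : Prop := a ≠ []
instance (a : List Int) : Decidable (Pre_max_asc a) := by unfold Pre_max_asc; infer_instance
def pvWitness_max_asc : List Int := [3, 1, 4, 1, 5]

def Spec_max_asc (a : List Int) (out : List Int) : Prop := out = max_asc_alt a
instance (a : List Int) (out : List Int) : Decidable (Spec_max_asc a out) := by unfold Spec_max_asc; infer_instance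

-- ===== CLAIM (what is proved, stated in full; the proofs are below) =====
def Claim_equal_max_asc : Prop := ∀ (a : List Int), Dom_max_asc a → Pre_max_asc a → Spec_max_asc a (max_asc a)

-- ===== LEMMAS AND PROOFS =====

-- value of a at a Nat index (all accesses below are in range, so the default is irrelevant)
def vA (a : List Int) (j : Nat) : Int := a.getD j 0

-- first index k ≥ i with x < a[k]
def firstGt (a : List Int) (x : Int) (i : Nat) : Option Nat :=
  if h : i < a.length then
    (if x < a.getD i 0 then some i else firstGt a x (i + 1))
  else none
termination_by a.length - i

theorem firstGt_bounds {a : List Int} {x : Int} {i j : Nat}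
    (h : firstGt a x i = some j) : i ≤ j ∧ j < a.length := by
  rw [firstGt] at h
  split at h
  · split at h
    · cases h; omega
    · have := firstGt_bounds h; omega
  · cases h
termination_by a.length - i

theorem firstGt_gt {a : List Int} {x : Int} {i j : Nat}
    (h : firstGt a x i = some j) : x < vA a j := by
  rw [firstGt] at h
  split at h
  next hi =>
    split at h
    next hx => cases h; exact hx
    · exact firstGt_gt h
  · cases h
termination_by a.length - i

theorem firstGt_min {a : List Int} {x : Int} {i j : Nat}
    (h : firstGt a x i = some j) : ∀ k, i ≤ k → k < j → vA a k ≤ x := by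
  intro k hik hkj
  rw [firstGt] at h
  split at h
  next hi =>
    split at h
    next hx => cases h; omega
    next hx =>
      rcases Nat.eq_or_lt_of_le hik with rfl | hlt
      · exact not_lt.mp hx
      · exact firstGt_min h k hlt hkj
  · cases h
termination_by a.length - i

theorem firstGt_none_spec {a : List Int} {x : Int} {i : Nat}
    (h : firstGt a x i = none) : ∀ k, i ≤ k → k < a.length → vA a k ≤ x := by
  intro k hik hk
  rw [firstGt] at h
  split at h
  next hi =>
    split at h
    next hx => cases h
    next hx =>
      rcases Nat.eq_or_lt_of_le hik with rfl | hlt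
      · exact not_lt.mp hx
      · exact firstGt_none_spec h k hlt hk
  next hi => omega
termination_by a.length - i

theorem firstGt_eq_none {a : List Int} {x : Int} {i : Nat}
    (h : ∀ k, i ≤ k → k < a.length → vA a k ≤ x) : firstGt a x i = none := by
  rw [firstGt]
  split
  next hi =>
    rw [if_neg (show ¬ x < a.getD i 0 from not_lt.mpr (h i le_rfl hi))]
    exact firstGt_eq_none (fun k hk hk2 => h k (by omega) hk2)
  · rfl
termination_by a.length - i

theorem firstGt_skip {a : List Int} {x : Int} {i j : Nat}
    (hij : i ≤ j) (h : ∀ k, i ≤ k → k < j → vA a k ≤ x) :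
    firstGt a x i = firstGt a x j := by
  rcases Nat.eq_or_lt_of_le hij with rfl | hlt
  · rfl
  · rw [firstGt]
    split
    next hi =>
      rw [if_neg (show ¬ x < a.getD i 0 from not_lt.mpr (h i le_rfl hlt))]
      exact firstGt_skip hlt (fun k hk hk2 => h k (by omega) hk2)
    next hi =>
      rw [firstGt, dif_neg (by omega)]
termination_by j - i

-- the greedy forward-ascending chain starting at index i, as indices
def chainIdx (a : List Int) (i : Nat) : List Nat :=
  if h : i < a.length then
    i :: (match h2 : firstGt a (a.getD i 0) (i + 1) with
      | some j => chainIdx a j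
      | none => [])
  else []
termination_by a.length - i
decreasing_by
  have := firstGt_bounds h2
  omega

-- greedy selection of elements strictly above a running maximum
def sel (x : Int) : List Int → List Int
  | [] => []
  | y :: ys => if x < y then y :: sel y ys else sel x ys

def gsel : List Int → List Int
  | [] => []
  | y :: ys => y :: sel y ys

theorem sel_firstGt (a : List Int) (i : Nat) (hi : i ≤ a.length) (x : Int) :
    sel x (a.drop i) =
      (match firstGt a x i with
        | none => []
        | some k => vA a k :: sel (vA a k) (a.drop (k + 1))) := by
  rcases Nat.eq_or_lt_of_le hi with rfl | hlt
  · rw [firstGt, dif_neg (by omega), List.drop_length]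
    simp [sel]
  · have hdrop : a.drop i = a[i] :: a.drop (i + 1) := List.drop_eq_getElem_cons hlt
    have hget : a.getD i 0 = a[i] := List.getD_eq_getElem a 0 hlt
    rw [firstGt, dif_pos hlt]
    by_cases hx : x < a.getD i 0
    · rw [if_pos hx, hdrop, sel, if_pos (hget ▸ hx)]
      show _ = vA a i :: sel (vA a i) (a.drop (i + 1))
      rw [show vA a i = a[i] from hget]
    · rw [if_neg hx, hdrop, sel, if_neg (hget ▸ hx)]
      exact sel_firstGt a (i + 1) hlt x
termination_by a.length - i

theorem chainIdx_eq_some {a : List Int} {i j : Nat} (hi : i < a.length)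
    (h2 : firstGt a (a.getD i 0) (i + 1) = some j) :
    chainIdx a i = i :: chainIdx a j := by
  rw [chainIdx, dif_pos hi]
  split
  next j' hj' => rw [h2] at hj'; cases hj'; rfl
  next hj' => rw [h2] at hj'; cases hj'

theorem chainIdx_eq_none {a : List Int} {i : Nat} (hi : i < a.length)
    (h2 : firstGt a (a.getD i 0) (i + 1) = none) :
    chainIdx a i = [i] := by
  rw [chainIdx, dif_pos hi]
  split
  next j' hj' => rw [h2] at hj'; cases hj'
  next hj' => rfl

theorem chainIdx_map (a : List Int) (i : Nat) (hi : i < a.length) :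
    (chainIdx a i).map (vA a) = gsel (a.drop i) := by
  have hget : a.getD i 0 = a[i] := List.getD_eq_getElem a 0 hi
  rw [List.drop_eq_getElem_cons hi, gsel, ← hget,
    sel_firstGt a (i + 1) hi (a.getD i 0)]
  cases h2 : firstGt a (a.getD i 0) (i + 1) with
  | some j =>
    have hb := firstGt_bounds h2
    rw [chainIdx_eq_some hi h2, List.map_cons, chainIdx_map a j hb.2,
      List.drop_eq_getElem_cons hb.2, gsel]
    show vA a i :: a[j] :: _ = _ :: vA a j :: sel (vA a j) _
    rw [show vA a i = a.getD i 0 from rfl,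
      show vA a j = a[j] from List.getD_eq_getElem a 0 hb.2]
  | none =>
    rw [chainIdx_eq_none hi h2]
    show [vA a i] = [a.getD i 0]
    rfl
termination_by a.length - i

-- A's inner fold computes gsel
theorem foldl_aStep_sel : ∀ (l acc : List Int) (x : Int), acc.getLast? = some x →
    l.foldl aStep acc = acc ++ sel x l := by
  intro l
  induction l with
  | nil => intro acc x h; simp [sel]
  | cons y ys ih =>
    intro acc x h
    have hstep : aStep acc y = if x < y then acc ++ [y] else acc := by
      rw [aStep, h]
    by_cases hxy : x < y
    · rw [List.foldl_cons, hstep, if_pos hxy,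
        ih (acc ++ [y]) y (by simp), sel, if_pos hxy, List.append_assoc]
      rfl
    · rw [List.foldl_cons, hstep, if_neg hxy, ih acc x h, sel, if_neg hxy]

theorem foldl_aStep_gsel (l : List Int) : l.foldl aStep [] = gsel l := by
  cases l with
  | nil => rfl
  | cons y ys =>
    rw [List.foldl_cons, show aStep [] y = [y] from rfl,
      foldl_aStep_sel ys [y] y (by simp), gsel]
    rfl

-- the two argmax loops agree: A's (max_len, max_i) pair tracks bArg's index
theorem aArg_eq_bArg (L : Int → Int) :
    ∀ (R : List Int) (b : Int),
      aArg L R (L b, b) = (L (bArg L R b), bArg L R b) := by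
  intro R
  induction R with
  | nil => intro b; rfl
  | cons i R ih =>
    intro b
    simp only [aArg, bArg, List.foldl_cons]
    by_cases h : L b < L i
    · simp only [if_pos h]
      exact ih i
    · simp only [if_neg h]
      exact ih b

theorem bArg_congr (L1 L2 : Int → Int) (P : Int → Prop)
    (hL : ∀ i, P i → L1 i = L2 i) :
    ∀ (R : List Int) (b : Int), P b → (∀ i ∈ R, P i) →
      bArg L1 R b = bArg L2 R b ∧ P (bArg L2 R b) := by
  intro R
  induction R with
  | nil => intro b hb _; exact ⟨rfl, hb⟩
  | cons i R ih =>
    intro b hb hmem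
    have hi : P i := hmem i List.mem_cons_self
    simp only [bArg, List.foldl_cons, hL b hb, hL i hi]
    by_cases h : L2 b < L2 i
    · simp only [if_pos h]
      exact ih i hi (fun k hk => hmem k (List.mem_cons_of_mem _ hk))
    · simp only [if_neg h]
      exact ih b hb (fun k hk => hmem k (List.mem_cons_of_mem _ hk))

-- B-side machinery-- B-side machinery: the fold state after processing indices k, k+1, …, len-1
def bstate (a : List Int) (k : Nat) : List (Option Int) × List Int :=
  (((List.range' k (a.length - k)).reverse).map (fun m => ((m : Nat) : Int))).foldl
    (bstep a) (List.replicate a.length none, List.replicate a.length 0)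

-- the ideal next-greater link
def idealN (a : List Int) (j : Nat) : Option Int :=
  (firstGt a (a.getD j 0) (j + 1)).map (fun m => ((m : Nat) : Int))

theorem getD_set' {α : Type} (l : List α) (i j : Nat) (v d : α) (hi : i < l.length) :
    (l.set i v).getD j d = if i = j then v else l.getD j d := by
  by_cases h : i = j
  · subst h; simp [List.getD_eq_getElem?_getD, hi]
  · simp [List.getD_eq_getElem?_getD, h]

theorem bWalk_none (a : List Int) (nxt : List (Option Int)) (x : Int) (fuel : Nat) :
    bWalk a nxt x none fuel = none := by
  cases fuel <;> rfl

theorem bWalk_spec (a : List Int) (nxt : List (Option Int)) (k : Nat)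
    (hinv : ∀ j, k + 1 ≤ j → j < a.length → nxt.getD j none = idealN a j)
    (fuel m : Nat) (x : Int) (h1 : k + 1 ≤ m) (h2 : m ≤ a.length)
    (h3 : a.length - m < fuel) :
    bWalk a nxt x (if ((m : Nat) : Int) < ((a.length : Int)) then some ((m : Nat) : Int) else none) fuel
      = (firstGt a x m).map (fun q => ((q : Nat) : Int)) := by
  by_cases hm : m < a.length
  · rw [if_pos (by exact_mod_cast hm)]
    match fuel, h3 with
    | fuel + 1, _ =>
    rw [bWalk]
    have hga : PySem.List.pyGetD a ((m : Nat) : Int) 0 = a.getD m 0 := by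
      simp [PySem.List.pyGetD_natCast]
    by_cases hx : a.getD m 0 ≤ x
    · rw [hga, if_pos hx, Int.toNat_natCast,
        hinv m h1 hm, idealN]
      cases h2' : firstGt a (a.getD m 0) (m + 1) with
      | none =>
        rw [Option.map_none, bWalk_none]
        have : firstGt a x m = none := by
          rw [firstGt, dif_pos hm, if_neg (not_lt.mpr hx)]
          exact firstGt_eq_none (fun t ht ht2 =>
            le_trans (firstGt_none_spec h2' t ht ht2) hx)
        rw [this]; rfl
      | some q =>
        have hb := firstGt_bounds h2'
        rw [Option.map_some,
          show (some ((q : Nat) : Int)) =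
            (if ((q : Nat) : Int) < ((a.length : Int)) then some ((q : Nat) : Int) else none) from
            (if_pos (by exact_mod_cast hb.2)).symm,
          bWalk_spec a nxt k hinv fuel q x (by omega) (le_of_lt hb.2) (by omega)]
        have : firstGt a x m = firstGt a x q := by
          rw [firstGt, dif_pos hm, if_neg (not_lt.mpr hx)]
          exact firstGt_skip hb.1 (fun t ht ht2 =>
            le_trans (firstGt_min h2' t ht ht2) hx)
        rw [this]
    · rw [hga, if_neg hx,
        show firstGt a x m = some m from by
          rw [firstGt, dif_pos hm, if_pos (lt_of_not_ge hx)],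
        Option.map_some]
  · rw [if_neg (by exact_mod_cast hm), bWalk_none,
      show firstGt a x m = none from by rw [firstGt, dif_neg hm]]
    rfl
termination_by fuel

theorem bstate_eq_step (a : List Int) (k : Nat) (hk : k < a.length) :
    bstate a k = bstep a (bstate a (k + 1)) ((k : Nat) : Int) := by
  rw [bstate, bstate, show a.length - k = (a.length - (k + 1)) + 1 from by omega,
    List.range'_succ, List.reverse_cons, List.map_append, List.foldl_append]
  rfl

theorem bstate_spec (a : List Int) (k : Nat) (hk : k ≤ a.length) :
    (bstate a k).1.length = a.length ∧ (bstate a k).2.length = a.length ∧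
    (∀ j, j < a.length →
      (bstate a k).1.getD j none = (if k ≤ j then idealN a j else none) ∧
      (bstate a k).2.getD j 0 = (if k ≤ j then ((chainIdx a j).length : Int) else 0)) := by
  rcases Nat.eq_or_lt_of_le hk with heq | hlt
  · subst heq
    have hb : bstate a a.length = (List.replicate a.length none, List.replicate a.length 0) := by
      rw [bstate, Nat.sub_self]; rfl
    rw [hb]
    refine ⟨List.length_replicate, List.length_replicate, fun j hj => ⟨?_, ?_⟩⟩
    · rw [if_neg (by omega)]
      simp [List.getD_eq_getElem?_getD, List.getElem?_replicate, hj]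
    · rw [if_neg (by omega)]
      simp [List.getD_eq_getElem?_getD, List.getElem?_replicate, hj]
  · obtain ⟨hl1, hl2, hinvs⟩ := bstate_spec a (k + 1) hlt
    rw [bstate_eq_step a k hlt]
    have hinv1 : ∀ j, k + 1 ≤ j → j < a.length →
        (bstate a (k + 1)).1.getD j none = idealN a j := by
      intro j h1 h2
      rw [(hinvs j h2).1, if_pos h1]
    have hj0 : (if ((k : Nat) : Int) + 1 < ((a.length : Int)) then some (((k : Nat) : Int) + 1) else none)
        = (if (((k + 1 : Nat)) : Int) < ((a.length : Int)) then some (((k + 1 : Nat) : Int)) else none) := by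
      push_cast; rfl
    have hwalk : bWalk a (bstate a (k + 1)).1 (PySem.List.pyGetD a ((k : Nat) : Int) 0)
        (if ((k : Nat) : Int) + 1 < ((a.length : Int)) then some (((k : Nat) : Int) + 1) else none) a.length
        = idealN a k := by
      rw [hj0, show PySem.List.pyGetD a ((k : Nat) : Int) 0 = a.getD k 0 from by
          simp [PySem.List.pyGetD_natCast],
        bWalk_spec a (bstate a (k + 1)).1 k hinv1 a.length (k + 1) (a.getD k 0)
          le_rfl hlt (by omega)]
      rfl
    have hli : (1 + (match idealN a k with
        | some jj => (bstate a (k + 1)).2.getD jj.toNat 0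
        | none => 0) : Int) = ((chainIdx a k).length : Int) := by
      rw [idealN]
      cases h2 : firstGt a (a.getD k 0) (k + 1) with
      | none =>
        rw [chainIdx_eq_none hlt h2]
        rfl
      | some q =>
        have hb := firstGt_bounds h2
        rw [Option.map_some]
        show (1 : Int) + (bstate a (k + 1)).2.getD ((q : Int)).toNat 0 = _
        rw [Int.toNat_natCast, (hinvs q hb.2).2, if_pos hb.1,
          chainIdx_eq_some hlt h2, List.length_cons]
        push_cast
        ring
    simp only [bstep, hwalk, hli, Int.toNat_natCast]
    refine ⟨by rw [List.length_set]; exact hl1, by rw [List.length_set]; exact hl2,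
      fun j hj => ⟨?_, ?_⟩⟩
    · rw [getD_set' _ _ _ _ _ (by omega)]
      by_cases hkj : k = j
      · subst hkj; rw [if_pos rfl, if_pos le_rfl]
      · rw [if_neg hkj, (hinvs j hj).1]
        by_cases h1 : k + 1 ≤ j
        · rw [if_pos h1, if_pos (by omega)]
        · rw [if_neg h1, if_neg (by omega)]
    · rw [getD_set' _ _ _ _ _ (by omega)]
      by_cases hkj : k = j
      · subst hkj; rw [if_pos rfl, if_pos le_rfl]
      · rw [if_neg hkj, (hinvs j hj).2]
        by_cases h1 : k + 1 ≤ j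
        · rw [if_pos h1, if_pos (by omega)]
        · rw [if_neg h1, if_neg (by omega)]
termination_by a.length - k

theorem bCollect_none (a : List Int) (nxt : List (Option Int)) (fuel : Nat) (res : List Int) :
    bCollect a nxt none fuel res = res := by
  cases fuel <;> rfl

theorem bCollect_spec (a : List Int) (nxt : List (Option Int))
    (hinv : ∀ j, j < a.length → nxt.getD j none = idealN a j)
    (fuel m : Nat) (res : List Int) (hm : m < a.length) (hf : a.length - m ≤ fuel) :
    bCollect a nxt (some ((m : Nat) : Int)) fuel res = res ++ (chainIdx a m).map (vA a) := by
  match fuel, hf with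
  | 0, h => exact absurd h (by omega)
  | fuel + 1, _ =>
  rw [bCollect, Int.toNat_natCast, hinv m hm, idealN,
    show PySem.List.pyGetD a ((m : Nat) : Int) 0 = a.getD m 0 from by
      simp [PySem.List.pyGetD_natCast]]
  cases h2' : firstGt a (a.getD m 0) (m + 1) with
  | none =>
    rw [Option.map_none, chainIdx_eq_none hm h2', bCollect_none]
    rfl
  | some q =>
    have hb := firstGt_bounds h2'
    rw [Option.map_some,
      bCollect_spec a nxt hinv fuel q (res ++ [a.getD m 0]) hb.2 (by omega),
      chainIdx_eq_some hm h2', List.map_cons, List.append_assoc]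
    rfl
termination_by fuel

-- ===== VERDICT (by name: the statement is the Claim_ definition above) =====
theorem max_asc_spec : Claim_equal_max_asc := by
  intro a _dom hpre
  unfold Spec_max_asc
  have hn : 0 < a.length := List.length_pos_of_ne_nil hpre
  have hnI : (0 : Int) < ((a.length : Int)) := by exact_mod_cast hn
  -- the ideal length function and the in-range predicate
  have hrow : ∀ i : Int, 0 ≤ i → i < ((a.length : Int)) →
      PySem.List.pyGetD (aSubSeq a) i [] = gsel (a.drop i.toNat) := by
    intro i h1 h2
    rw [aSubSeq, PySem.List.pyGetD_map_pyRange_of_nonneg _ _ _ _ h1 h2, aRow,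
      PySem.List.foldl_pyRange_pyGetD' a 0 aStep [] h1, foldl_aStep_gsel]
  have hLA : ∀ i : Int, (0 ≤ i ∧ i < ((a.length : Int))) →
      (fun i => ((PySem.List.pyGetD (aSubSeq a) i []).length : Int)) i
        = (fun i : Int => ((chainIdx a i.toNat).length : Int)) i := by
    intro i hi
    have hti : i.toNat < a.length := by omega
    simp only []
    rw [hrow i hi.1 hi.2, ← chainIdx_map a i.toNat hti, List.length_map]
  have hmem : ∀ i ∈ PySem.List.pyRange 1 ((a.length : Int)) 1,
      (0 ≤ i ∧ i < ((a.length : Int))) := by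
    intro i hi
    rw [PySem.List.mem_pyRange_one] at hi
    omega
  obtain ⟨hba, hbP⟩ := bArg_congr _ _ _ hLA (PySem.List.pyRange 1 ((a.length : Int)) 1) 0
    ⟨le_rfl, hnI⟩ hmem
  -- A's result
  have hA : max_asc a =
      gsel (a.drop ((bArg (fun i : Int => ((chainIdx a i.toNat).length : Int))
        (PySem.List.pyRange 1 ((a.length : Int)) 1) 0).toNat)) := by
    simp only [max_asc]
    rw [PySem.List.pyRange_one_cons hnI, zero_add]
    have hstep : aArg (fun i => ((PySem.List.pyGetD (aSubSeq a) i []).length : Int))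
        ((0 : Int) :: PySem.List.pyRange 1 ((a.length : Int)) 1)
        (((PySem.List.pyGetD (aSubSeq a) 0 []).length : Int), 0)
      = aArg (fun i => ((PySem.List.pyGetD (aSubSeq a) i []).length : Int))
        (PySem.List.pyRange 1 ((a.length : Int)) 1)
        (((PySem.List.pyGetD (aSubSeq a) 0 []).length : Int), 0) := by
      rw [aArg, aArg, List.foldl_cons]
      norm_num
    rw [hstep, aArg_eq_bArg _ _ 0, hba]
    exact hrow _ hbP.1 hbP.2
  -- B's result
  obtain ⟨hl1, hl2, hinvs⟩ := bstate_spec a 0 (Nat.zero_le _)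
  have hfold : ((PySem.List.pyRange 0 ((a.length : Int)) 1).reverse).foldl (bstep a)
      (List.replicate a.length none, List.replicate a.length 0) = bstate a 0 := by
    rw [bstate, PySem.List.pyRange_one, Nat.sub_zero, ← List.map_reverse,
      List.range_eq_range']
    simp
  have hLB : ∀ i : Int, (0 ≤ i ∧ i < ((a.length : Int))) →
      (fun i : Int => (bstate a 0).2.getD i.toNat 0) i
        = (fun i : Int => ((chainIdx a i.toNat).length : Int)) i := by
    intro i hi
    have hti : i.toNat < a.length := by omega
    simp only []
    rw [(hinvs i.toNat hti).2, if_pos (Nat.zero_le _)]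
  obtain ⟨hbb, _⟩ := bArg_congr _ _ _ hLB (PySem.List.pyRange 1 ((a.length : Int)) 1) 0
    ⟨le_rfl, hnI⟩ hmem
  have hB : max_asc_alt a =
      gsel (a.drop ((bArg (fun i : Int => ((chainIdx a i.toNat).length : Int))
        (PySem.List.pyRange 1 ((a.length : Int)) 1) 0).toNat)) := by
    simp only [max_asc_alt]
    rw [hfold, hbb]
    set b2 := bArg (fun i : Int => ((chainIdx a i.toNat).length : Int))
      (PySem.List.pyRange 1 ((a.length : Int)) 1) 0 with hb2
    have hb2t : b2.toNat < a.length := by omega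
    rw [show (some b2 : Option Int) = some ((b2.toNat : Nat) : Int) from by
        rw [Int.toNat_of_nonneg hbP.1],
      bCollect_spec a (bstate a 0).1
        (fun j hj => by rw [(hinvs j hj).1, if_pos (Nat.zero_le _)])
        a.length b2.toNat [] hb2t (by omega),
      List.nil_append, chainIdx_map a b2.toNat hb2t]
  rw [hA, hB]
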